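-- pv_equiv track=rewrite | github.com/sjlongland/aioax25 | aioax25/aprs/compression.py | compress
-- ===== SOURCE A (Python) =====
-- BYTE_VALUE_OFFSET = 33
--
-- BYTE_VALUE_RADIX = 91
--
-- def compress(value, length):
--     # Initialise our byte values
--     bvalue = [0] * length
--
--     # Figure out the bytes
--     for pos in range(length):
--         (div, rem) = divmod(
--                 value,
--                 BYTE_VALUE_RADIX ** (length - pos - 1)
--         )
--         bvalue[pos] += int(div)
--         value = rem
--
--     # Encode them into ASCII
--     return ''.join([chr(b + BYTE_VALUE_OFFSET) for b in bvalue])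
-- ===== SOURCE B (Python) =====
-- BYTE_VALUE_OFFSET = 33
--
-- BYTE_VALUE_RADIX = 91
--
-- def compress(value, length):
--     # Extract digits least-significant first by repeated divmod by the radix,
--     # then reverse; one O(1)-size divmod per digit instead of a divmod by a
--     # fresh large power of the radix at every position.
--     if length <= 0:
--         return ''
--     chars = []
--     for _ in range(length - 1):
--         (value, rem) = divmod(value, BYTE_VALUE_RADIX)
--         chars.append(chr(rem + BYTE_VALUE_OFFSET))
--     # whatever quotient is left is the top digit, exactly as A's first divmod
--     chars.append(chr(value + BYTE_VALUE_OFFSET))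
--     return ''.join(reversed(chars))
-- ===== Notes on version B (the rewrite author's own statement) =====
-- stated objective: faster
-- what changed: B extracts base-91 digits least-significant first by repeated divmod by the constant radix 91 and reverses, instead of A's divmod by a freshly computed power 91**(length-pos-1) at every position.
import Mathlib
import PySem

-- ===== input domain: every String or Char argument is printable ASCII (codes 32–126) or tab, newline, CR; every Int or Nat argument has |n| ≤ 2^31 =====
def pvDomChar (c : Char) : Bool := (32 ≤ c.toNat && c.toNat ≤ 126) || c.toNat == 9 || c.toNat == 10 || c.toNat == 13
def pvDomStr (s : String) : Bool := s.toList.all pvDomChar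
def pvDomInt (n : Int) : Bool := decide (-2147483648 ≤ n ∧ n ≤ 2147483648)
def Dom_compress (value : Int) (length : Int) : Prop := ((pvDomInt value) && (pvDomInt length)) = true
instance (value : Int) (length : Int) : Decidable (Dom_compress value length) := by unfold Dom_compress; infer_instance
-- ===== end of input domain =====

-- B extracts base-91 digits least-significant first by repeated divmod by 91 and reverses,
-- instead of A's divmod by a fresh large power of 91 at every position (objective: faster).

-- ===== PORT A =====
def compress (value : Int) (length : Int) : String :=
  -- bvalue = [0] * length
  let bvalue : List Int := List.replicate length.toNat 0
  -- for pos in range(length): (div, rem) = divmod(value, 91 ** (length - pos - 1)); bvalue[pos] += int(div); value = rem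
  -- (the exponent length - pos - 1 is ≥ 0 for every pos produced by the range, so .toNat is exact)
  let st :=
    (PySem.List.pyRange 0 length 1).foldl
      (fun (st : List Int × Int) (pos : Int) =>
        let p : Int := (91 : Int) ^ (length - pos - 1).toNat
        let div := PySem.Int.floordiv st.2 p
        let rem := PySem.Int.mod st.2 p
        (PySem.List.pySetD st.1 pos (PySem.List.pyGetD st.1 pos 0 + div), rem))
      (bvalue, value)
  -- ''.join([chr(b + 33) for b in bvalue])
  String.ofList (st.1.map (fun b => Char.ofNat (b + 33).toNat))

-- ===== PORT B =====
def compress_alt (value : Int) (length : Int) : String :=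
  if length ≤ 0 then "" else
  -- for _ in range(length - 1): (value, rem) = divmod(value, 91); chars.append(chr(rem + 33))
  let st :=
    (PySem.List.pyRange 0 (length - 1) 1).foldl
      (fun (st : Int × List Char) (_ : Int) =>
        let q := PySem.Int.floordiv st.1 91
        let rem := PySem.Int.mod st.1 91
        (q, st.2 ++ [Char.ofNat (rem + 33).toNat]))
      (value, [])
  -- chars.append(chr(value + 33)); return ''.join(reversed(chars))
  String.ofList ((st.2 ++ [Char.ofNat (st.1 + 33).toNat]).reverse)

-- ===== PRECONDITION & SPEC =====
-- Pre_ excludes inputs where Python's chr raises ValueError (top digit pushes the code point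
-- below 0 or past 0x10FFFF — there A raises and so does B) and the tiny sliver where the top
-- code point is a lone surrogate: there A and B both return the same one-surrogate string,
-- which is not representable as a Lean String. Only the top digit can leave [0, 90]; the
-- remaining digits are remainders mod 91 and always encode printable ASCII.
-- For 7 ≤ length the divisor 91^(length-1) exceeds 2^31·33, so on every value admitted by
-- Dom_compress the top digit is 0 or -1 and chr succeeds: that branch keeps the predicate
-- evaluable without computing an astronomically large power of 91.
def Pre_compress (value : Int) (length : Int) : Prop :=
  length ≤ 0 ∨ 7 ≤ length ∨
    (let c := PySem.Int.floordiv value ((91 : Int) ^ (length - 1).toNat) + 33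
     (0 ≤ c ∧ c < 55296) ∨ (57344 ≤ c ∧ c < 1114112))
instance (value : Int) (length : Int) : Decidable (Pre_compress value length) := by
  unfold Pre_compress; infer_instance
def pvWitness_compress : Int × Int := (123456, 4)
def Spec_compress (value : Int) (length : Int) (out : String) : Prop := out = compress_alt value length
instance (value : Int) (length : Int) (out : String) : Decidable (Spec_compress value length out) := by unfold Spec_compress; infer_instance

-- ===== CLAIM (what is proved, stated in full; the proofs are below) =====
def Claim_equal_compress : Prop := ∀ (value : Int) (length : Int), Dom_compress value length → Pre_compress value length → Spec_compress value length (compress value length)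

-- ===== LEMMAS AND PROOFS =====

-- MSB-first digit list exactly as A peels it off: top digit = v // 91^e, then recurse on v % 91^e.
def digA : Nat → Int → List Int
  | 0, _ => []
  | e+1, v => PySem.Int.floordiv v ((91:Int)^e) :: digA e (PySem.Int.mod v ((91:Int)^e))

-- the remainder A's loop is left with (second state component)
def remA : Nat → Int → Int
  | 0, v => v
  | e+1, v => remA e (PySem.Int.mod v ((91:Int)^e))

-- B's final quotient after n divmods by 91
def qB : Nat → Int → Int
  | 0, v => v
  | n+1, v => qB n (PySem.Int.floordiv v 91)

-- B's LSB-first list of low digits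
def lowB : Nat → Int → List Int
  | 0, _ => []
  | n+1, v => PySem.Int.mod v 91 :: lowB n (PySem.Int.floordiv v 91)

theorem pow91_pos (n : Nat) : (0:Int) < 91 ^ n := pow_pos (by norm_num) n

theorem fd_pow_succ (n : Nat) (v : Int) :
    PySem.Int.floordiv v ((91:Int)^(n+1)) =
      PySem.Int.floordiv (PySem.Int.floordiv v 91) ((91:Int)^n) := by
  rw [PySem.Int.floordiv_eq_ediv_of_pos (pow91_pos (n+1)),
      PySem.Int.floordiv_eq_ediv_of_pos (by norm_num : (0:Int) < 91),
      PySem.Int.floordiv_eq_ediv_of_pos (pow91_pos n),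
      Int.ediv_ediv_of_nonneg (by norm_num : (0:Int) ≤ 91)]
  ring_nf

theorem md_md (n : Nat) (v : Int) :
    PySem.Int.mod (PySem.Int.mod v ((91:Int)^(n+2))) 91 = PySem.Int.mod v 91 := by
  rw [PySem.Int.mod_eq_emod_of_pos (pow91_pos (n+2)),
      PySem.Int.mod_eq_emod_of_pos (by norm_num : (0:Int) < 91),
      PySem.Int.mod_eq_emod_of_pos (by norm_num : (0:Int) < 91)]
  exact Int.emod_emod_of_dvd v (dvd_pow_self 91 (by omega))

theorem fd_md (n : Nat) (v : Int) :
    PySem.Int.floordiv (PySem.Int.mod v ((91:Int)^(n+2))) 91 =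
      PySem.Int.mod (PySem.Int.floordiv v 91) ((91:Int)^(n+1)) := by
  rw [PySem.Int.mod_eq_emod_of_pos (pow91_pos (n+2)),
      PySem.Int.floordiv_eq_ediv_of_pos (by norm_num : (0:Int) < 91),
      PySem.Int.floordiv_eq_ediv_of_pos (by norm_num : (0:Int) < 91),
      PySem.Int.mod_eq_emod_of_pos (pow91_pos (n+1))]
  set P : Int := (91:Int)^(n+1) with hP
  have hPpos : (0:Int) < P := pow91_pos (n+1)
  have hpow : (91:Int)^(n+2) = P * 91 := by rw [hP, pow_succ]
  rw [hpow]
  set q := v / (P * 91) with hq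
  set r := v % (P * 91) with hr
  have hvr : v = r + (P * q) * 91 := by
    have := Int.mul_ediv_add_emod v (P * 91)
    rw [← hq, ← hr] at this; linarith
  have h1 : v / 91 = r / 91 + P * q := by
    conv_lhs => rw [hvr]
    exact Int.add_mul_ediv_right r (P * q) (by norm_num)
  have hr0 : 0 ≤ r := Int.emod_nonneg v (by positivity)
  have hrlt : r < P * 91 := Int.emod_lt_of_pos v (by positivity)
  have h2 : r / 91 < P := (Int.ediv_lt_iff_lt_mul (by norm_num)).2 hrlt
  have h3 : 0 ≤ r / 91 := Int.ediv_nonneg hr0 (by norm_num)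
  rw [h1, Int.add_mul_emod_self_left, Int.emod_eq_of_lt h3 h2]

-- A's two-step peel equals one divmod-by-91 step at the bottom
theorem digA_step (n : Nat) : ∀ v : Int,
    digA (n+2) v = digA (n+1) (PySem.Int.floordiv v 91) ++ [PySem.Int.mod v 91] := by
  induction n with
  | zero =>
      intro v
      simp [digA, pow_zero]
  | succ n ih =>
      intro v
      show (PySem.Int.floordiv v ((91:Int)^(n+2)) :: digA (n+2) (PySem.Int.mod v ((91:Int)^(n+2))))
        = _
      rw [ih (PySem.Int.mod v ((91:Int)^(n+2)))]
      show _ = PySem.Int.floordiv (PySem.Int.floordiv v 91) ((91:Int)^(n+1))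
          :: digA (n+1) (PySem.Int.mod (PySem.Int.floordiv v 91) ((91:Int)^(n+1))) ++ _
      rw [← fd_pow_succ (n+1) v, ← fd_md n v, md_md n v]
      simp

-- A's digit list = B's top quotient followed by B's low digits reversed
theorem digA_eq_qB_lowB (n : Nat) : ∀ v : Int,
    digA (n+1) v = qB n v :: (lowB n v).reverse := by
  induction n with
  | zero => intro v; simp [digA, qB, lowB, pow_zero]
  | succ n ih =>
      intro v
      rw [digA_step n v, ih (PySem.Int.floordiv v 91)]
      simp [qB, lowB]

-- A's loop invariant: processing positions k, …, length-1 (m of them) fills the remaining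
-- m zero slots with digA m v and leaves remainder remA m v.
theorem foldA (length : Int) :
    ∀ (m : Nat) (k : Int) (pre : List Int) (v : Int),
      0 ≤ k → k + m = length → pre.length = k.toNat →
      (PySem.List.pyRange k length 1).foldl
        (fun (st : List Int × Int) (pos : Int) =>
          (PySem.List.pySetD st.1 pos
            (PySem.List.pyGetD st.1 pos 0 + PySem.Int.floordiv st.2 ((91:Int) ^ (length - pos - 1).toNat)),
           PySem.Int.mod st.2 ((91:Int) ^ (length - pos - 1).toNat)))
        (pre ++ List.replicate m 0, v)
      = (pre ++ digA m v, remA m v) := by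
  intro m
  induction m with
  | zero =>
      intro k pre v hk0 hk _
      rw [PySem.List.pyRange_one_eq_nil (by omega)]
      simp [digA, remA]
  | succ m ih =>
      intro k pre v hk0 hk hpre
      have hexp : (length - k - 1).toNat = m := by omega
      rw [PySem.List.pyRange_one_cons (by omega), List.foldl_cons]
      have hrep : List.replicate (m+1) (0:Int) = 0 :: List.replicate m 0 := rfl
      simp only [hrep, hexp]
      have hget : PySem.List.pyGetD (pre ++ 0 :: List.replicate m (0:Int)) k 0 = 0 := by
        have hk' : k = ((k.toNat : Nat) : Int) := by omega
        rw [hk', PySem.List.pyGetD_natCast, ← hpre]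
        simp
      have hset : PySem.List.pySetD (pre ++ 0 :: List.replicate m (0:Int)) k
            (0 + PySem.Int.floordiv v ((91:Int)^m))
          = (pre ++ [PySem.Int.floordiv v ((91:Int)^m)]) ++ List.replicate m 0 := by
        have hk' : k = ((k.toNat : Nat) : Int) := by omega
        rw [hk', PySem.List.pySetD_natCast, ← hpre]
        simp
      rw [hget, hset,
        ih (k+1) (pre ++ [PySem.Int.floordiv v ((91:Int)^m)])
          (PySem.Int.mod v ((91:Int)^m)) (by omega) (by push_cast at hk ⊢; omega)
          (by simp [hpre]; omega)]
      simp [digA, remA]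

-- A computes exactly the MSB-first digit list digA length.toNat value
theorem compress_eq_digA (value length : Int) :
    compress value length
      = String.ofList ((digA length.toNat value).map (fun b => Char.ofNat (b + 33).toNat)) := by
  simp only [compress]
  by_cases h : length ≤ 0
  · have h0 : length.toNat = 0 := by omega
    rw [PySem.List.pyRange_one_eq_nil (by omega)]
    simp [h0, digA]
  · rw [show (List.replicate length.toNat (0:Int)) = [] ++ List.replicate length.toNat 0 from rfl,
        foldA length length.toNat 0 [] value le_rfl (by omega) rfl]
    simp

-- B's loop ignores the loop variable: n iterations from (v, acc) give (qB n v, acc ++ chr-encoded lowB n v)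
theorem foldB : ∀ (l : List Int) (v : Int) (acc : List Char),
    l.foldl
      (fun (st : Int × List Char) (_ : Int) =>
        let q := PySem.Int.floordiv st.1 91
        let rem := PySem.Int.mod st.1 91
        (q, st.2 ++ [Char.ofNat (rem + 33).toNat]))
      (v, acc)
    = (qB l.length v, acc ++ (lowB l.length v).map (fun b => Char.ofNat (b + 33).toNat)) := by
  intro l
  induction l with
  | nil => intro v acc; simp [qB, lowB]
  | cons x t ih =>
      intro v acc
      rw [List.foldl_cons, ih]
      simp [qB, lowB]

-- B computes the same digit list
theorem alt_eq_digA (value length : Int) :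
    compress_alt value length
      = String.ofList ((digA length.toNat value).map (fun b => Char.ofNat (b + 33).toNat)) := by
  unfold compress_alt
  by_cases h : length ≤ 0
  · have h0 : length.toNat = 0 := by omega
    simp [h, h0, digA]
  · rw [if_neg h, foldB, PySem.List.length_pyRange_one]
    have hn : length.toNat = (length - 1 - 0).toNat + 1 := by omega
    rw [hn, digA_eq_qB_lowB]
    simp

-- ===== VERDICT (by name: the statement is the Claim_ definition above) =====
theorem compress_spec : Claim_equal_compress := by
  intro value length _ _
  unfold Spec_compress
  rw [compress_eq_digA, alt_eq_digA]
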